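-- pv_equiv track=rewrite | github.com/boufik/Python-Core-Concepts | Cryptography/Hamming Code/main.py | fill_with_parity
-- ===== SOURCE A (Python) =====
-- import copy
--
-- def fill_with_parity(codeword_no_redundant, par_bits):
--     codeword = copy.deepcopy(codeword_no_redundant)
--     counter = 0
--     for i in range(len(codeword)):
--         if codeword[i] == -1:
--             codeword[i] = par_bits[counter]
--             counter += 1
--     return codeword, codeword_no_redundant
-- ===== SOURCE B (Python) =====
-- def _split(cw):
--     # split cw into segments separated by -1 placeholders (recursive on the head)
--     if not cw:
--         return [[]]
--     head, rest = cw[0], cw[1:]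
--     if head == -1:
--         return [[]] + _split(rest)
--     segs = _split(rest)
--     return [[head] + segs[0]] + segs[1:]
--
-- def _join(segs, pb, j):
--     # glue the segments back together with pb[j], pb[j+1], ... between them
--     if len(segs) == 1:
--         return list(segs[0])
--     return list(segs[0]) + [pb[j]] + _join(segs[1:], pb, j + 1)
--
-- def fill_with_parity(codeword_no_redundant, par_bits):
--     return _join(_split(codeword_no_redundant), par_bits, 0), codeword_no_redundant
-- ===== Notes on version B (the rewrite author's own statement) =====
-- stated objective: alternative
-- what changed: Replaces A's single in-place scan with a running counter by a recursive split/join algorithm: the word is split into the segments between -1 placeholders and then glued back together with successive parity bits between the segments.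
import Mathlib
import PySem

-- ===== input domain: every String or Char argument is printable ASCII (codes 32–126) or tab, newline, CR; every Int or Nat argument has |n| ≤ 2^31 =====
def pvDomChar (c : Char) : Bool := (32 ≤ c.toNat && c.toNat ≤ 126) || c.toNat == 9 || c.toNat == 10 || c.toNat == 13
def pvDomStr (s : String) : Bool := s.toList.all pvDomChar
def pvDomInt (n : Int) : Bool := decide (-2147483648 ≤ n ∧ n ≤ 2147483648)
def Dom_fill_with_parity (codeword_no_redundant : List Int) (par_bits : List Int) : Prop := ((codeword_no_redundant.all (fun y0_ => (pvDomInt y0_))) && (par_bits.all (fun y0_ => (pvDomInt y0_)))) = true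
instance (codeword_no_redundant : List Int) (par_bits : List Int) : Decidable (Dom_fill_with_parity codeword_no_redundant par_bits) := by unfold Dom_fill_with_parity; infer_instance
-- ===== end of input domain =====

-- B rebuilds the word by a recursive split-on-placeholder / join-with-parity-bits pass
-- instead of A's single in-place scan with a running counter (objective: alternative).

-- ===== PORT A =====
-- counter-tracking pass: each cell equal to -1 is replaced by par_bits[counter], counter += 1
-- (pyGetD is exact here: Pre_ guarantees counter stays in range)
def fillA_go (par_bits : List Int) : List Int → Int → List Int
  | [], _ => []
  | x :: rest, counter =>
      if x == -1 then PySem.List.pyGetD par_bits counter 0 :: fillA_go par_bits rest (counter + 1)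
      else x :: fillA_go par_bits rest counter

def fill_with_parity (codeword_no_redundant : List Int) (par_bits : List Int) : List Int × List Int :=
  (fillA_go par_bits codeword_no_redundant 0, codeword_no_redundant)

-- ===== PORT B =====
-- _split: cut the word into the segments lying between the -1 placeholders
def splitB : List Int → List (List Int)
  | [] => [[]]
  | head :: rest =>
      if head == -1 then [] :: splitB rest
      else
        match splitB rest with
        | s :: ss => (head :: s) :: ss
        | [] => [[head]]          -- unreachable: splitB never returns []

-- _join: glue the segments back with pb[j], pb[j+1], ... between them
def joinB (pb : List Int) : List (List Int) → Int → List Int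
  | [], _ => []                   -- unreachable: only called on splitB output
  | [s], _ => s
  | s :: rest, j => s ++ [PySem.List.pyGetD pb j 0] ++ joinB pb rest (j + 1)

def fill_with_parity_alt (codeword_no_redundant : List Int) (par_bits : List Int) : List Int × List Int :=
  (joinB par_bits (splitB codeword_no_redundant) 0, codeword_no_redundant)

-- ===== PRECONDITION & SPEC =====
-- Pre_ excludes exactly the inputs where Python A raises IndexError: more -1 placeholders
-- than parity bits.
def Pre_fill_with_parity (codeword_no_redundant : List Int) (par_bits : List Int) : Prop :=
  codeword_no_redundant.count (-1) ≤ par_bits.length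
instance (codeword_no_redundant : List Int) (par_bits : List Int) : Decidable (Pre_fill_with_parity codeword_no_redundant par_bits) := by unfold Pre_fill_with_parity; infer_instance

def pvWitness_fill_with_parity : List Int × List Int := ([1, -1, 0, -1], [1, 0])

def Spec_fill_with_parity (codeword_no_redundant : List Int) (par_bits : List Int) (out : List Int × List Int) : Prop := out = fill_with_parity_alt codeword_no_redundant par_bits
instance (codeword_no_redundant : List Int) (par_bits : List Int) (out : List Int × List Int) : Decidable (Spec_fill_with_parity codeword_no_redundant par_bits out) := by unfold Spec_fill_with_parity; infer_instance

-- ===== CLAIM (what is proved, stated in full; the proofs are below) =====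
def Claim_equal_fill_with_parity : Prop := ∀ (codeword_no_redundant : List Int) (par_bits : List Int), Dom_fill_with_parity codeword_no_redundant par_bits → Pre_fill_with_parity codeword_no_redundant par_bits → Spec_fill_with_parity codeword_no_redundant par_bits (fill_with_parity codeword_no_redundant par_bits)

-- ===== LEMMAS AND PROOFS =====

lemma splitB_ne_nil (cw : List Int) : splitB cw ≠ [] := by
  cases cw with
  | nil => simp [splitB]
  | cons x rest =>
      unfold splitB
      split
      · simp
      · cases h : splitB rest <;> simp

-- joining the split of cw from counter j is exactly A's counter pass from j
lemma join_split (pb : List Int) (cw : List Int) : ∀ (j : Int),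
    joinB pb (splitB cw) j = fillA_go pb cw j := by
  induction cw with
  | nil => intro j; simp [splitB, joinB, fillA_go]
  | cons x rest ih =>
      intro j
      by_cases h : (x == -1) = true
      · rw [show splitB (x :: rest) = [] :: splitB rest by simp [splitB, h]]
        cases hs : splitB rest with
        | nil => exact absurd hs (splitB_ne_nil rest)
        | cons s ss =>
            rw [show joinB pb ([] :: s :: ss) j
                  = [] ++ [PySem.List.pyGetD pb j 0] ++ joinB pb (s :: ss) (j + 1) from rfl,
                ← hs, ih (j + 1)]
            simp [fillA_go, h]
      · cases hs : splitB rest with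
        | nil => exact absurd hs (splitB_ne_nil rest)
        | cons s ss =>
            rw [show splitB (x :: rest) = (x :: s) :: ss by simp [splitB, h, hs]]
            have hrec := ih j
            rw [hs] at hrec
            cases ss with
            | nil =>
                simp only [joinB] at hrec ⊢
                simp [fillA_go, h, ← hrec]
            | cons s2 ss2 =>
                simp only [joinB] at hrec ⊢
                simp [fillA_go, h, ← hrec]

-- ===== VERDICT (by name: the statement is the Claim_ definition above) =====
theorem fill_with_parity_spec : Claim_equal_fill_with_parity := by
  intro cw pb _ _
  unfold Spec_fill_with_parity fill_with_parity fill_with_parity_alt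
  rw [join_split pb cw 0]
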